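-- pv_equiv track=rewrite | github.com/jackd71-ops/syndrome-open-claw | data/stic/retailer_scraper.py | batch_ranges
-- ===== SOURCE A (Python) =====
-- def batch_ranges(total):
--     """Return list of (offset, limit) tuples for 3 equal batches."""
--     size, rem = total // 3, total % 3
--     ranges, offset = [], 0
--     for i in range(3):
--         limit = size + (1 if i < rem else 0)
--         ranges.append((offset, limit))
--         offset += limit
--     return ranges
-- ===== SOURCE B (Python) =====
-- def batch_ranges(total):
--     """Return list of (offset, limit) tuples for 3 equal batches (closed form)."""
--     size, rem = total // 3, total % 3
--     return [(i * size + min(i, rem), size + (1 if i < rem else 0)) for i in range(3)]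
-- ===== Notes on version B (the rewrite author's own statement) =====
-- stated objective: simpler
-- what changed: The loop with a running offset accumulator is replaced by a closed-form comprehension: each batch's offset is computed directly as i*size + min(i, rem).
import Mathlib
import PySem

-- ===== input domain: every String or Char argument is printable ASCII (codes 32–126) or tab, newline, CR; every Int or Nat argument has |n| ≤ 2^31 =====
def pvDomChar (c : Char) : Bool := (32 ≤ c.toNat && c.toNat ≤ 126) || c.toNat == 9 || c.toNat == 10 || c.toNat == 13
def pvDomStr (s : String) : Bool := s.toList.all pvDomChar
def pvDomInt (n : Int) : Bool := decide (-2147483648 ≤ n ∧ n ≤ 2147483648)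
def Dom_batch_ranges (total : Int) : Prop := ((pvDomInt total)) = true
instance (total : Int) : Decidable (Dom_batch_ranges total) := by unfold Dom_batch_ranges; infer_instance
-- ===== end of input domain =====

-- ===== PORT A =====
-- B replaces the running-offset loop by a closed-form offset i*size + min(i,rem); same values, simpler.
def batch_ranges (total : Int) : List (Int × Int) :=
  let size := PySem.Int.floordiv total 3
  let rem := PySem.Int.mod total 3
  (PySem.List.pyRange 0 3 1).foldl
    (fun (st : List (Int × Int) × Int) i =>
      let limit := size + (if i < rem then 1 else 0)
      (st.1 ++ [(st.2, limit)], st.2 + limit))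
    ([], 0) |>.1

-- ===== PORT B =====
def batch_ranges_alt (total : Int) : List (Int × Int) :=
  let size := PySem.Int.floordiv total 3
  let rem := PySem.Int.mod total 3
  (PySem.List.pyRange 0 3 1).map
    (fun i => (i * size + min i rem, size + (if i < rem then 1 else 0)))

-- ===== PRECONDITION & SPEC =====
def Spec_batch_ranges (total : Int) (out : List (Int × Int)) : Prop := out = batch_ranges_alt total
instance (total : Int) (out : List (Int × Int)) : Decidable (Spec_batch_ranges total out) := by unfold Spec_batch_ranges; infer_instance

-- ===== CLAIM (what is proved, stated in full; the proofs are below) =====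
def Claim_equal_batch_ranges : Prop := ∀ (total : Int), Dom_batch_ranges total → Spec_batch_ranges total (batch_ranges total)

-- ===== LEMMAS AND PROOFS =====

-- ===== VERDICT (by name: the statement is the Claim_ definition above) =====
theorem batch_ranges_spec : Claim_equal_batch_ranges := by
  intro total _
  unfold Spec_batch_ranges batch_ranges batch_ranges_alt
  simp [PySem.List.pyRange, List.range_succ, min_def]
  refine ⟨?_, ?_⟩ <;> (try split_ifs) <;> omega
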